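-- pv_equiv track=rewrite | github.com/Suk1412/NexlifyAPP | weave/tools.py | can_cover
-- ===== SOURCE A (Python) =====
-- def can_cover(A, B):
--     """与布防图比较，判断安全区是否可以覆盖"""
--     A_sorted = sorted(A, reverse=True)
--     B_sorted = sorted(B, reverse=True)
--     used = [False] * len(A_sorted)
--     for b in B_sorted:
--         found = False
--         for i, a in enumerate(A_sorted):
--             if not used[i] and a >= b:
--                 used[i] = True
--                 found = True
--                 break
--         if not found:
--             return False
--     return True
-- ===== SOURCE B (Python) =====
-- def can_cover(A, B):
--     """与布防图比较，判断安全区是否可以覆盖"""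
--     if len(B) > len(A):
--         return False
--     A_sorted = sorted(A, reverse=True)
--     B_sorted = sorted(B, reverse=True)
--     return all(a >= b for a, b in zip(A_sorted, B_sorted))
-- ===== Notes on version B (the rewrite author's own statement) =====
-- stated objective: faster
-- what changed: Replaced the greedy inner scan over a used[] array (O(|A|*|B|)) by the Hall condition: sort both descending and compare elementwise A[i] >= B[i] in one zip pass.
import Mathlib
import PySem

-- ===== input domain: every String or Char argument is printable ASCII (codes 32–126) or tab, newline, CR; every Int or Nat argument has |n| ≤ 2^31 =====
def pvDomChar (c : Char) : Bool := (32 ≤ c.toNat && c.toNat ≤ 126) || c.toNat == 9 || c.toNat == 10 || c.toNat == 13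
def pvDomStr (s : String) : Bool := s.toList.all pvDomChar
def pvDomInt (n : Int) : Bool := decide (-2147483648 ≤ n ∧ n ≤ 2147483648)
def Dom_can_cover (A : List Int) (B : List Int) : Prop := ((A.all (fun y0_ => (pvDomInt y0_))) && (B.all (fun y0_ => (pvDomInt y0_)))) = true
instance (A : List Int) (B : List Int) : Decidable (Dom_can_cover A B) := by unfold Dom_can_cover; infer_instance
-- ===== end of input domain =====

-- B replaces A's quadratic greedy used[]-array matching by the one-pass Hall condition on the two descending-sorted lists (asymptotically faster).


-- ===== PORT A =====
-- inner 'for i, a in enumerate(A_sorted): if not used[i] and a >= b: …' — walks A and used in step;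
-- returns the updated used list if a slot was found (found = True), none otherwise
def canCoverFind (As : List Int) (used : List Bool) (b : Int) : Option (List Bool) :=
  match As, used with
  | a :: as_, u :: us =>
      if !u && decide (a ≥ b) then some (true :: us)
      else (canCoverFind as_ us b).map (u :: ·)
  | _, _ => none

-- outer 'for b in B_sorted: … if not found: return False' loop
def canCoverLoop (As : List Int) (Bs : List Int) (used : List Bool) : Bool :=
  match Bs with
  | [] => true
  | b :: bs =>
      match canCoverFind As used b with
      | some used' => canCoverLoop As bs used'
      | none => false

def can_cover (A : List Int) (B : List Int) : Bool :=
  let A_sorted := PySem.List.sorted A (fun x => x) true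
  let B_sorted := PySem.List.sorted B (fun x => x) true
  canCoverLoop A_sorted B_sorted (List.replicate A_sorted.length false)

-- ===== PORT B =====
def can_cover_alt (A : List Int) (B : List Int) : Bool :=
  if B.length > A.length then false
  else
    let A_sorted := PySem.List.sorted A (fun x => x) true
    let B_sorted := PySem.List.sorted B (fun x => x) true
    (A_sorted.zip B_sorted).all (fun p => decide (p.1 ≥ p.2))

-- ===== PRECONDITION & SPEC =====
def Spec_can_cover (A : List Int) (B : List Int) (out : Bool) : Prop := out = can_cover_alt A B
instance (A : List Int) (B : List Int) (out : Bool) : Decidable (Spec_can_cover A B out) := by unfold Spec_can_cover; infer_instance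

-- ===== CLAIM (what is proved, stated in full; the proofs are below) =====
def Claim_equal_can_cover : Prop := ∀ (A : List Int) (B : List Int), Dom_can_cover A B → Spec_can_cover A B (can_cover A B)

-- ===== LEMMAS AND PROOFS =====

-- the already-used prefix of the state is skipped unchanged
theorem canCoverFind_skip (As1 As2 : List Int) (us : List Bool) (b : Int) :
    canCoverFind (As1 ++ As2) (List.replicate As1.length true ++ us) b
      = (canCoverFind As2 us b).map (List.replicate As1.length true ++ ·) := by
  induction As1 with
  | nil => simp
  | cons a as_ ih =>
      show ((canCoverFind (as_ ++ As2) (List.replicate as_.length true ++ us) b).map (true :: ·))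
          = (canCoverFind As2 us b).map (List.replicate (as_.length + 1) true ++ ·)
      rw [ih, Option.map_map]
      rfl

-- if no element qualifies, the scan over a fresh state fails
theorem canCoverFind_none (As : List Int) (b : Int) (h : ∀ x ∈ As, ¬ x ≥ b) :
    canCoverFind As (List.replicate As.length false) b = none := by
  induction As with
  | nil => rfl
  | cons a as_ ih =>
      simp [canCoverFind, List.replicate, h a (by simp),
        ih (fun x hx => h x (by simp [hx]))]

-- on a fresh (all-false) suffix of a descending list, the scan takes the head or fails
theorem canCoverFind_fresh (a : Int) (as_ : List Int) (b : Int)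
    (hs : (a :: as_).Pairwise (fun x y => y ≤ x)) :
    canCoverFind (a :: as_) (List.replicate (a :: as_).length false) b
      = if a ≥ b then some (true :: List.replicate as_.length false) else none := by
  by_cases hab : a ≥ b
  · simp [canCoverFind, List.replicate, hab]
  · have hall : ∀ x ∈ (a :: as_), ¬ (x ≥ b) := by
      intro x hx
      rcases List.mem_cons.mp hx with rfl | hx'
      · exact hab
      · have := (List.pairwise_cons.mp hs).1 x hx'
        omega
    rw [if_neg hab]
    exact canCoverFind_none (a :: as_) b hall

-- pointwise comparison of a descending list against an arbitrary demand list
def allGe (As Bs : List Int) : Bool :=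
  match As, Bs with
  | _, [] => true
  | [], _ :: _ => false
  | a :: as_, b :: bs => decide (a ≥ b) && allGe as_ bs

theorem canCoverLoop_allGe (Bs : List Int) :
    ∀ (As1 As2 : List Int), As2.Pairwise (fun x y => y ≤ x) →
    canCoverLoop (As1 ++ As2) Bs (List.replicate As1.length true ++ List.replicate As2.length false)
      = allGe As2 Bs := by
  induction Bs with
  | nil => intro As1 As2 _; simp [canCoverLoop, allGe]
  | cons b bs ih =>
      intro As1 As2 hs
      cases As2 with
      | nil =>
          have h0 : canCoverFind As1 (List.replicate As1.length true) b = none := by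
            simpa using canCoverFind_skip As1 [] [] b
          simp [canCoverLoop, h0, allGe]
      | cons a as_ =>
          have hfind := canCoverFind_skip As1 (a :: as_) (List.replicate (a :: as_).length false) b
          rw [canCoverFind_fresh a as_ b hs] at hfind
          simp only [List.length_cons] at hfind
          by_cases hab : a ≥ b
          · have hstep : canCoverFind (As1 ++ a :: as_)
                (List.replicate As1.length true ++ List.replicate (as_.length + 1) false) b
                = some (List.replicate As1.length true ++ (true :: List.replicate as_.length false)) := by
              rw [hfind]; simp [hab]
            have hre : List.replicate As1.length true ++ (true :: List.replicate as_.length false)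
                = List.replicate (As1 ++ [a]).length true ++ List.replicate as_.length false := by
              simp [List.replicate_succ']
            have happ : As1 ++ a :: as_ = (As1 ++ [a]) ++ as_ := by simp
            have ihx := ih (As1 ++ [a]) as_ (List.Pairwise.of_cons hs)
            simp only [canCoverLoop, List.length_cons, hstep, hre]
            rw [happ, ihx]
            simp [allGe, hab]
          · have hstep : canCoverFind (As1 ++ a :: as_)
                (List.replicate As1.length true ++ List.replicate (as_.length + 1) false) b = none := by
              rw [hfind]; simp [hab]
            simp only [canCoverLoop, List.length_cons, hstep, allGe]
            simp [hab]

theorem allGe_zip (As Bs : List Int) :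
    allGe As Bs = (!(decide (Bs.length > As.length)) && (As.zip Bs).all (fun p => decide (p.1 ≥ p.2))) := by
  induction As generalizing Bs with
  | nil => cases Bs <;> simp [allGe]
  | cons a as_ ih =>
      cases Bs with
      | nil => simp [allGe]
      | cons b bs =>
          simp [allGe, ih bs]
          by_cases hab : a ≥ b <;> simp [hab]

-- ===== VERDICT (by name: the statement is the Claim_ definition above) =====
theorem can_cover_spec : Claim_equal_can_cover := by
  unfold Claim_equal_can_cover
  intro A B _
  unfold Spec_can_cover can_cover can_cover_alt
  have hA := PySem.List.sorted_pairwise_rev (xs := A) (key := fun x : Int => x)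
  have hloop := canCoverLoop_allGe (PySem.List.sorted B (fun x => x) true) []
      (PySem.List.sorted A (fun x => x) true) hA
  simp only [List.nil_append, List.replicate, List.length_nil] at hloop
  rw [hloop, allGe_zip]
  have hlB : (PySem.List.sorted B (fun x => x) true).length = B.length := PySem.List.length_sorted ..
  have hlA : (PySem.List.sorted A (fun x => x) true).length = A.length := PySem.List.length_sorted ..
  rw [hlA, hlB]
  by_cases h : B.length > A.length <;> simp [h]
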